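-- pv_equiv track=rewrite | github.com/TatianaVerlova/IntroToPython | SEMINARS_PYTHON/03SemPy/Task21.py | second_in
-- ===== SOURCE A (Python) =====
-- def second_in(list, find):
--     count = 0
--     for i in range(len(list)):
--         if list[i] == find:
--             count += 1
--         if count == 2:
--             return i
--     return -1
-- ===== SOURCE B (Python) =====
-- def second_in(list, find):
--     first = second = -1
--     for i in range(len(list) - 1, -1, -1):
--         if list[i] == find:
--             first, second = i, first
--     return second
-- ===== Notes on version B (the rewrite author's own statement) =====
-- stated objective: alternative
-- what changed: Replaces A's left-to-right counting loop with early exit by a right-to-left pass that maintains the (first, second) occurrence indices of the current suffix, shifting first into second whenever the element matches; the answer is built back-to-front with no counter and no early return.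
import Mathlib
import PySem

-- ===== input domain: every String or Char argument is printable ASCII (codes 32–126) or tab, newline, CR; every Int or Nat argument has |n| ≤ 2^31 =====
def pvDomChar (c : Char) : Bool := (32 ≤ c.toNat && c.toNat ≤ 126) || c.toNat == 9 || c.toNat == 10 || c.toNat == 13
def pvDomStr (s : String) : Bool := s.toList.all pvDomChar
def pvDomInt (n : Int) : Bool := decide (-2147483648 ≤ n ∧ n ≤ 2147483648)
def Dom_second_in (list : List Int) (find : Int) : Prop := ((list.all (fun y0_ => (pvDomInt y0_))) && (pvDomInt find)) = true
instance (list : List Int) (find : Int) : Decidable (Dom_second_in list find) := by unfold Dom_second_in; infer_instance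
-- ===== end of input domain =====

-- B scans right-to-left maintaining the (first, second) occurrence pair instead of A's counting loop; alternative decomposition, same cost.


-- ===== PORT A =====
-- A's loop over range(len(list)): structural recursion carrying the running index i and count.
def secondInLoopA : List Int → Int → Int → Int → Int
  | [], _, _, _ => -1
  | x :: rest, find, i, count =>
    let count' := if x = find then count + 1 else count
    if count' = 2 then i else secondInLoopA rest find (i + 1) count'

def second_in (list : List Int) (find : Int) : Int :=
  secondInLoopA list find 0 0

-- ===== PORT B =====
-- B scans right-to-left keeping (first, second) occurrence indices of the suffix already
-- seen; altGo processes the tail (higher indices) first, then element x at index i last,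
-- matching the descending range loop in Source B.
def altGo : List Int → Int → Int → Int × Int
  | [], _, _ => (-1, -1)
  | x :: rest, find, i =>
    let st := altGo rest find (i + 1)
    if x = find then (i, st.1) else st

def second_in_alt (list : List Int) (find : Int) : Int :=
  (altGo list find 0).2

-- ===== PRECONDITION & SPEC =====
def Spec_second_in (list : List Int) (find : Int) (out : Int) : Prop := out = second_in_alt list find
instance (list : List Int) (find : Int) (out : Int) : Decidable (Spec_second_in list find out) := by unfold Spec_second_in; infer_instance

-- ===== CLAIM (what is proved, stated in full; the proofs are below) =====
def Claim_equal_second_in : Prop := ∀ (list : List Int) (find : Int), Dom_second_in list find → Spec_second_in list find (second_in list find)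

-- ===== LEMMAS AND PROOFS =====

-- ===== VERDICT (by name: the statement is the Claim_ definition above) =====
-- With count 1 already, A's loop returns the first remaining occurrence (altGo's .1).
lemma loopA_one (l : List Int) (f i : Int) :
    secondInLoopA l f i 1 = (altGo l f i).1 := by
  induction l generalizing i with
  | nil => simp [secondInLoopA, altGo]
  | cons x rest ih =>
    by_cases hx : x = f
    · simp [secondInLoopA, altGo, hx]
    · simpa [secondInLoopA, altGo, hx] using ih (i + 1)

-- With count 0, A's loop returns the second remaining occurrence (altGo's .2).
lemma loopA_zero (l : List Int) (f i : Int) :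
    secondInLoopA l f i 0 = (altGo l f i).2 := by
  induction l generalizing i with
  | nil => simp [secondInLoopA, altGo]
  | cons x rest ih =>
    by_cases hx : x = f
    · simpa [secondInLoopA, altGo, hx] using loopA_one rest f (i + 1)
    · simpa [secondInLoopA, altGo, hx] using ih (i + 1)

-- ===== VERDICT (by name: the statement is the Claim_ definition above) =====
theorem second_in_spec : Claim_equal_second_in := by
  intro list find _
  unfold Spec_second_in second_in second_in_alt
  exact loopA_zero list find 0
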